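-- pv_equiv track=rewrite | github.com/Lui105/VINF_crawler | extractor_spark.py | disambiguate_headlines_py
-- ===== SOURCE A (Python) =====
-- def disambiguate_headlines_py(tables: list) -> list:
--     seen = {}
--     for t in tables:
--         h = t["headline"]
--         count = seen.get(h, 0)
--         if count == 1:
--             t["headline"] = f"{h} Playoffs"
--         seen[h] = count + 1
--     return tables
-- ===== SOURCE B (Python) =====
-- def disambiguate_headlines_py(tables: list) -> list:
--     # Phase 1: index each headline to the list of positions where it occurs.
--     index = {}
--     for i, t in enumerate(tables):
--         index.setdefault(t["headline"], []).append(i)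
--     # Phase 2: for every headline occurring at least twice, rename its
--     # second occurrence in place (third and later occurrences untouched).
--     for h, ps in index.items():
--         if len(ps) >= 2:
--             tables[ps[1]]["headline"] = f"{h} Playoffs"
--     return tables
-- ===== Notes on version B (the rewrite author's own statement) =====
-- stated objective: alternative
-- what changed: Replaces the single-pass running-counter loop by a two-phase scheme: one pass builds a headline-to-positions index, then a pass over the index patches exactly the second position of each duplicated headline.
import Mathlib
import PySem

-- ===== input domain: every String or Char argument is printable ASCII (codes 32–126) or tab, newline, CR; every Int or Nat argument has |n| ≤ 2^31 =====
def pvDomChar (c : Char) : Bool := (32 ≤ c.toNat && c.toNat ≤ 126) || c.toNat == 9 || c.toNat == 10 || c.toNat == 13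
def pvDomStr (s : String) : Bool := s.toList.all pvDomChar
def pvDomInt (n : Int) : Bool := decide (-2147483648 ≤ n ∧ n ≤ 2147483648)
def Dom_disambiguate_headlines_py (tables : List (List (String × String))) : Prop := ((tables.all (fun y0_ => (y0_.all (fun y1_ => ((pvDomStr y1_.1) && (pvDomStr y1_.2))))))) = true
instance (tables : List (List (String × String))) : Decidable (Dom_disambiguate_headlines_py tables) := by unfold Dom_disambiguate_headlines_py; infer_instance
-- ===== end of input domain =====

-- B renames the second occurrence of each duplicated headline via a headline→positions
-- index built in a first pass, instead of A's running-counter single pass (objective: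
-- alternative decomposition). Both Pythons mutate `tables`' dicts in place and return
-- the same list; the equivalence proved here is about the return value.

-- shared dict primitives on one table (a Python dict ported as an association list)
def pvHl (t : List (String × String)) : String := (PySem.Dict.mk t).getD "headline" ""
def pvSetH (t : List (String × String)) (v : String) : List (String × String) :=
  ((PySem.Dict.mk t).insert "headline" v).items

-- ===== PORT A =====
def pvGoA (seen : PySem.Dict String Int) :
    List (List (String × String)) → List (List (String × String))
  | [] => []
  | t :: rest =>
    let h := pvHl t
    let c := seen.getD h 0
    (if c = 1 then pvSetH t (h ++ " Playoffs") else t) :: pvGoA (seen.insert h (c + 1)) rest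

def disambiguate_headlines_py (tables : List (List (String × String))) :
    List (List (String × String)) :=
  pvGoA PySem.Dict.empty tables

-- ===== PORT B =====
-- `index.setdefault(t["headline"], []).append(i)` over `enumerate(tables)`
def pvIndex (tables : List (List (String × String))) : PySem.Dict String (List Nat) :=
  ((tables.zipIdx).map (fun p => (pvHl p.1, p.2))).foldl
    (fun d q => d.modify q.1 [] (fun l => l ++ [q.2])) PySem.Dict.empty

-- `if len(ps) >= 2: tables[ps[1]]["headline"] = f"{h} Playoffs"`
def pvPatchOne (ts : List (List (String × String))) (h : String) (ps : List Nat) :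
    List (List (String × String)) :=
  match ps with
  | _ :: p :: _ =>
    match ts[p]? with
    | some t => ts.set p (pvSetH t (h ++ " Playoffs"))
    | none => ts
  | _ => ts

def disambiguate_headlines_py_alt (tables : List (List (String × String))) :
    List (List (String × String)) :=
  (pvIndex tables).items.foldl (fun ts q => pvPatchOne ts q.1 q.2) tables

-- ===== PRECONDITION & SPEC =====
-- Pre_ excludes exactly the inputs where a table lacks the "headline" key:
-- there the Python A raises KeyError (and B raises KeyError too).
def Pre_disambiguate_headlines_py (tables : List (List (String × String))) : Prop :=
  ∀ t ∈ tables, (PySem.Dict.mk t).contains "headline" = true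
instance (tables : List (List (String × String))) : Decidable (Pre_disambiguate_headlines_py tables) := by
  unfold Pre_disambiguate_headlines_py; infer_instance

def pvWitness_disambiguate_headlines_py : (List (List (String × String))) :=
  [[("headline", "A"), ("rows", "1")], [("headline", "B")], [("headline", "A")]]

def Spec_disambiguate_headlines_py (tables : List (List (String × String))) (out : List (List (String × String))) : Prop := out = disambiguate_headlines_py_alt tables
instance (tables : List (List (String × String))) (out : List (List (String × String))) : Decidable (Spec_disambiguate_headlines_py tables out) := by unfold Spec_disambiguate_headlines_py; infer_instance

-- ===== CLAIM (what is proved, stated in full; the proofs are below) =====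
def Claim_equal_disambiguate_headlines_py : Prop := ∀ (tables : List (List (String × String))), Dom_disambiguate_headlines_py tables → Pre_disambiguate_headlines_py tables → Spec_disambiguate_headlines_py tables (disambiguate_headlines_py tables)

-- ===== LEMMAS AND PROOFS =====

-- the common positional description: element i is patched iff exactly one earlier
-- element carries the same headline
def pvCnt (pre : List (List (String × String))) (k : String) : Nat :=
  pre.countP (fun u => pvHl u == k)

def pvSpecGo (pre : List (List (String × String))) :
    List (List (String × String)) → List (List (String × String))
  | [] => []
  | t :: rest =>
    (if pvCnt pre (pvHl t) = 1 then pvSetH t (pvHl t ++ " Playoffs") else t) ::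
      pvSpecGo (pre ++ [t]) rest

-- positions (from offset n) whose headline is k
def pvPos (k : String) : List (List (String × String)) → Nat → List Nat
  | [], _ => []
  | t :: rest, n => (if pvHl t == k then [n] else []) ++ pvPos k rest (n + 1)

theorem pvCnt_append (pre : List (List (String × String))) (t) (k) :
    pvCnt (pre ++ [t]) k = pvCnt pre k + (if pvHl t == k then 1 else 0) := by
  simp [pvCnt, List.countP_append, List.countP_cons]

-- A's running counter realises pvSpecGo
theorem pvGoA_eq_spec (ts : List (List (String × String))) :
    ∀ (pre : List (List (String × String))) (seen : PySem.Dict String Int),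
      (∀ k, seen.getD k 0 = (pvCnt pre k : Int)) → pvGoA seen ts = pvSpecGo pre ts := by
  induction ts with
  | nil => intro pre seen h; rfl
  | cons t rest ih =>
    intro pre seen hinv
    simp only [pvGoA, pvSpecGo]
    have hc : seen.getD (pvHl t) 0 = 1 ↔ pvCnt pre (pvHl t) = 1 := by
      rw [hinv]; exact_mod_cast Iff.rfl
    rw [if_congr hc rfl rfl]
    refine congrArg (List.cons _) (ih _ _ ?_)
    intro k
    rw [PySem.Dict.getD_insert, pvCnt_append, hinv]
    by_cases hk : k = pvHl t
    · subst hk; simp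
    · have : (pvHl t == k) = false := by simp [Ne.symm hk]
      simp [hk, this, hinv]

theorem pvSpecGo_length (ts : List (List (String × String))) : ∀ pre,
    (pvSpecGo pre ts).length = ts.length := by
  induction ts with
  | nil => intro pre; rfl
  | cons t rest ih => intro pre; simp [pvSpecGo, ih]

theorem pvSpecGo_getElem? (ts : List (List (String × String))) :
    ∀ (pre : List (List (String × String))) (i : Nat) (hi : i < ts.length),
      (pvSpecGo pre ts)[i]? =
        some (if pvCnt (pre ++ ts.take i) (pvHl ts[i]) = 1
              then pvSetH ts[i] (pvHl ts[i] ++ " Playoffs") else ts[i]) := by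
  induction ts with
  | nil => intro pre i hi; simp at hi
  | cons t rest ih =>
    intro pre i hi
    match i with
    | 0 => simp [pvSpecGo]
    | j + 1 =>
      simp only [pvSpecGo, List.getElem?_cons_succ, List.take_succ_cons, List.getElem_cons_succ]
      rw [ih (pre ++ [t]) j (by simpa using hi)]
      simp

theorem pvPos_mem (k : String) (ts : List (List (String × String))) :
    ∀ (n p : Nat), p ∈ pvPos k ts n ↔
      ∃ j, ∃ hj : j < ts.length, p = n + j ∧ pvHl ts[j] = k := by
  induction ts with
  | nil => intro n p; simp [pvPos]
  | cons t rest ih =>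
    intro n p
    simp only [pvPos, List.mem_append, ih (n+1)]
    constructor
    · rintro (hp | ⟨j, hj, rfl, hk⟩)
      · refine ⟨0, by simp, ?_, ?_⟩
        · split at hp <;> simp_all
        · split at hp <;> simp_all [beq_iff_eq]
      · exact ⟨j + 1, by simpa using hj, by omega, by simpa using hk⟩
    · rintro ⟨j, hj, rfl, hk⟩
      match j with
      | 0 => left; simp_all
      | j + 1 =>
        right
        exact ⟨j, by simpa using hj, by omega, by simpa using hk⟩

theorem pvPos_pairwise (k : String) (ts : List (List (String × String))) :
    ∀ n, (pvPos k ts n).Pairwise (· < ·) := by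
  induction ts with
  | nil => intro n; simp [pvPos]
  | cons t rest ih =>
    intro n
    simp only [pvPos]
    have hge : ∀ p ∈ pvPos k rest (n + 1), n < p := by
      intro p hp
      obtain ⟨j, hj, rfl, _⟩ := (pvPos_mem k rest (n+1) p).mp hp
      omega
    split
    · exact List.Pairwise.cons hge (ih (n+1))
    · simpa using ih (n+1)

theorem pvPos_countP (k : String) (ts : List (List (String × String))) :
    ∀ (n i : Nat), i ≤ ts.length →
      (pvPos k ts n).countP (fun p => decide (p < n + i)) = pvCnt (ts.take i) k := by
  induction ts with
  | nil => intro n i hi; simp_all [pvPos, pvCnt]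
  | cons t rest ih =>
    intro n i hi
    have hge : ∀ p ∈ pvPos k rest (n + 1), n + 1 ≤ p := by
      intro p hp
      obtain ⟨j, hj, rfl, _⟩ := (pvPos_mem k rest (n+1) p).mp hp
      omega
    match i with
    | 0 =>
      simp only [pvPos, Nat.add_zero, List.countP_append, pvCnt, List.take_zero, List.countP_nil]
      have h2 : (pvPos k rest (n+1)).countP (fun p => decide (p < n)) = 0 := by
        rw [List.countP_eq_zero]; intro p hp; simpa using by have := hge p hp; omega
      split <;> simp_all
    | j + 1 =>
      simp only [pvPos, List.countP_append, List.take_succ_cons, pvCnt, List.countP_cons]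
      have heq : (pvPos k rest (n+1)).countP (fun p => decide (p < n + (j+1))) =
          (pvPos k rest (n+1)).countP (fun p => decide (p < (n+1) + j)) := by
        apply List.countP_congr; intro p _; simp; omega
      rw [heq, ih (n+1) j (by simpa using hi)]
      unfold pvCnt
      split
      · simp; omega
      · simp

theorem pvZip_filter (k : String) (ts : List (List (String × String))) :
    ∀ n, (((ts.zipIdx n).map (fun p => (pvHl p.1, p.2))).filter
        (fun q => q.1 == k)).map (fun q => q.2) = pvPos k ts n := by
  induction ts with
  | nil => intro n; simp [pvPos]
  | cons t rest ih =>
    intro n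
    rw [List.zipIdx_cons]
    simp only [List.map_cons, pvPos]
    by_cases h : pvHl t == k
    · rw [List.filter_cons_of_pos (by simpa using h)]
      simp only [List.map_cons, ih (n+1)]
      simp [h]
    · rw [List.filter_cons_of_neg (by simpa using h)]
      rw [ih (n+1)]
      simp [h]

theorem pvIndex_getD (tables : List (List (String × String))) (k : String) :
    (pvIndex tables).getD k [] = pvPos k tables 0 := by
  unfold pvIndex
  rw [PySem.Dict.getD_foldl_modify_append]
  rw [pvZip_filter k tables 0]
  simp

theorem pvIndex_keys (tables : List (List (String × String))) :
    (pvIndex tables).keys = PySem.Set.ofList (tables.map pvHl) := by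
  unfold pvIndex
  refine (PySem.Dict.keys_foldl_modify_key (κ := String) (ν := List Nat)
      (List.map (fun p => (pvHl p.1, p.2)) tables.zipIdx)
      (fun q => q.1) [] (fun _ q l => l ++ [q.2]) PySem.Dict.empty).trans ?_
  rw [PySem.Dict.keys_empty, PySem.Set.update_nil_left]
  congr 1
  calc List.map (fun q => q.1) (List.map (fun p => (pvHl p.1, p.2)) tables.zipIdx)
      = List.map pvHl (List.map Prod.fst tables.zipIdx) := by
        rw [List.map_map, List.map_map]; simp [Function.comp]
    _ = List.map pvHl tables := by rw [List.zipIdx_map_fst]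

theorem pvIndex_nodup (tables : List (List (String × String))) :
    (pvIndex tables).keys.Nodup := by
  unfold pvIndex
  exact PySem.Dict.nodup_keys_foldl_modify_key (κ := String) (ν := List Nat)
    (List.map (fun p => (pvHl p.1, p.2)) tables.zipIdx)
    (fun q => q.1) [] (fun _ q l => l ++ [q.2]) PySem.Dict.empty
    (by simp [PySem.Dict.keys_empty])

theorem pvPatchOne_length (ts : List (List (String × String))) (h : String) (ps : List Nat) :
    (pvPatchOne ts h ps).length = ts.length := by
  match ps with
  | [] => rfl
  | [p0] => rfl
  | _ :: p :: _ =>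
    simp only [pvPatchOne]
    cases hts : ts[p]? <;> simp [List.length_set]

theorem pvFold_patch (tables : List (List (String × String))) (ks : List String) :
    ∀ (ts : List (List (String × String))),
      ts.length = tables.length → ks.Nodup →
      (∀ i (hi : i < tables.length),
        ts[i]? = some (if pvHl tables[i] ∉ ks ∧ pvCnt (tables.take i) (pvHl tables[i]) = 1
                       then pvSetH tables[i] (pvHl tables[i] ++ " Playoffs") else tables[i])) →
      ∀ i (hi : i < tables.length),
        ((ks.map (fun k => (k, pvPos k tables 0))).foldl
            (fun ts q => pvPatchOne ts q.1 q.2) ts)[i]? =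
          some (if pvCnt (tables.take i) (pvHl tables[i]) = 1
                then pvSetH tables[i] (pvHl tables[i] ++ " Playoffs") else tables[i]) := by
  induction ks with
  | nil =>
    intro ts hlen hnd hinv i hi
    simpa using hinv i hi
  | cons k ks ih =>
    intro ts hlen hnd hinv i hi
    simp only [List.map_cons, List.foldl_cons]
    have hknotin : k ∉ ks := (List.nodup_cons.mp hnd).1
    refine ih (pvPatchOne ts k (pvPos k tables 0))
      ((pvPatchOne_length ts k (pvPos k tables 0)).trans hlen)
      (List.nodup_cons.mp hnd).2 ?_ i hi
    intro i' hi'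
    -- an occurrence of k is a member of pvPos k tables 0
    have hmem : ∀ (m : Nat) (hm : m < tables.length), pvHl tables[m] = k →
        m ∈ pvPos k tables 0 := by
      intro m hm hk
      exact (pvPos_mem k tables 0 m).mpr ⟨m, hm, by omega, hk⟩
    have hcnt_eq : ∀ (m : Nat) (hm : m < tables.length), pvHl tables[m] = k →
        pvCnt (tables.take m) (pvHl tables[m]) =
          (pvPos k tables 0).countP (fun p => decide (p < m)) := by
      intro m hm hk
      rw [hk, ← pvPos_countP k tables 0 m (Nat.le_of_lt hm)]
      simp
    cases hp : pvPos k tables 0 with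
    | nil =>
      -- no occurrence of k: nothing patched
      simp only [pvPatchOne]
      by_cases hk : pvHl tables[i'] = k
      · exact absurd (hp ▸ hmem i' hi' hk) (List.not_mem_nil)
      · have h1 : (pvHl tables[i'] ∉ k :: ks) ↔ (pvHl tables[i'] ∉ ks) := by
          simp [List.mem_cons, hk]
        rw [hinv i' hi']
        by_cases hc : pvHl tables[i'] ∉ ks ∧ pvCnt (tables.take i') (pvHl tables[i']) = 1
        · rw [if_pos hc, if_pos ⟨h1.mpr hc.1, hc.2⟩]
        · rw [if_neg hc, if_neg (by rw [not_and] at hc ⊢; intro hx; exact hc (h1.mp hx))]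
    | cons p0 tl =>
      have hpair : (p0 :: tl).Pairwise (· < ·) := hp ▸ pvPos_pairwise k tables 0
      cases tl with
      | nil =>
        -- a unique occurrence of k: nothing patched, and its count is 0
        simp only [pvPatchOne]
        by_cases hk : pvHl tables[i'] = k
        · have hm1 : i' ∈ [p0] := hp ▸ hmem i' hi' hk
          have hi'p0 : i' = p0 := by simpa using hm1
          have hc0 : pvCnt (tables.take i') (pvHl tables[i']) = 0 := by
            rw [hcnt_eq i' hi' hk, hp, hi'p0]
            simp
          rw [hinv i' hi', if_neg (by simp [hc0]), if_neg (by simp [hc0])]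
        · have h1 : (pvHl tables[i'] ∉ k :: ks) ↔ (pvHl tables[i'] ∉ ks) := by
            simp [List.mem_cons, hk]
          rw [hinv i' hi']
          by_cases hc : pvHl tables[i'] ∉ ks ∧ pvCnt (tables.take i') (pvHl tables[i']) = 1
          · rw [if_pos hc, if_pos ⟨h1.mpr hc.1, hc.2⟩]
          · rw [if_neg hc, if_neg (by rw [not_and] at hc ⊢; intro hx; exact hc (h1.mp hx))]
      | cons p1 tl2 =>
        -- k occurs at least twice: its second occurrence p1 gets patched
        have hp1mem : p1 ∈ pvPos k tables 0 := by rw [hp]; simp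
        obtain ⟨j1, hj1, hj1e, hj1k⟩ := (pvPos_mem k tables 0 p1).mp hp1mem
        have hp1lt : p1 < tables.length := by omega
        have hp1k : pvHl tables[p1] = k := by
          have hj : p1 = j1 := by omega
          subst hj; exact hj1k
        have hp0p1 : p0 < p1 := (List.pairwise_cons.mp hpair).1 p1 (by simp)
        have htl2 : ∀ x ∈ tl2, p1 < x :=
          (List.pairwise_cons.mp (List.pairwise_cons.mp hpair).2).1
        have htl2' : ∀ x ∈ tl2, p0 < x := fun x hx =>
          (List.pairwise_cons.mp hpair).1 x (by simp [hx])
        have hts_p1 : ts[p1]? = some tables[p1] := by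
          rw [hinv p1 hp1lt, if_neg (by rw [hp1k]; simp)]
        have hpatch : pvPatchOne ts k (p0 :: p1 :: tl2) =
            ts.set p1 (pvSetH tables[p1] (k ++ " Playoffs")) := by
          simp only [pvPatchOne, hts_p1]
        rw [hpatch]
        by_cases hip1 : i' = p1
        · subst hip1
          rw [List.getElem?_set_self (by omega)]
          have hc1 : pvCnt (tables.take i') (pvHl tables[i']) = 1 := by
            rw [hcnt_eq i' hi' hp1k, hp]
            simp only [List.countP_cons]
            have h0 : tl2.countP (fun p => decide (p < i')) = 0 := by
              rw [List.countP_eq_zero]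
              intro x hx
              simpa using by have := htl2 x hx; omega
            simp [h0, hp0p1]
          rw [if_pos ⟨by rw [hp1k]; exact hknotin, hc1⟩, hp1k]
        · rw [List.getElem?_set_ne (fun h => hip1 h.symm), hinv i' hi']
          by_cases hk : pvHl tables[i'] = k
          · -- another occurrence of k: first or third-and-later, count ≠ 1
            have hiin : i' ∈ p0 :: p1 :: tl2 := hp ▸ hmem i' hi' hk
            have hcne : pvCnt (tables.take i') (pvHl tables[i']) ≠ 1 := by
              rw [hcnt_eq i' hi' hk, hp]
              simp only [List.countP_cons]
              rcases List.mem_cons.mp hiin with h0 | hrest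
              · subst h0
                have hz : tl2.countP (fun p => decide (p < i')) = 0 := by
                  rw [List.countP_eq_zero]
                  intro x hx
                  simpa using by have := htl2' x hx; omega
                simp [hz]
                omega
              · rcases List.mem_cons.mp hrest with h1 | h2
                · exact absurd h1 hip1
                · have ha : (decide (p0 < i')) = true := by
                    simpa using htl2' i' h2
                  have hb : (decide (p1 < i')) = true := by
                    simpa using htl2 i' h2
                  simp [ha, hb]
            rw [if_neg (by simp [hcne]), if_neg (by simp [hcne])]
          · have h1 : (pvHl tables[i'] ∉ k :: ks) ↔ (pvHl tables[i'] ∉ ks) := by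
              simp [List.mem_cons, hk]
            by_cases hc : pvHl tables[i'] ∉ ks ∧ pvCnt (tables.take i') (pvHl tables[i']) = 1
            · rw [if_pos hc, if_pos ⟨h1.mpr hc.1, hc.2⟩]
            · rw [if_neg hc, if_neg (by rw [not_and] at hc ⊢; intro hx; exact hc (h1.mp hx))]

theorem pvFold_patch_length (items : List (String × List Nat)) :
    ∀ (ts : List (List (String × String))),
      (items.foldl (fun ts q => pvPatchOne ts q.1 q.2) ts).length = ts.length := by
  induction items with
  | nil => intro ts; rfl
  | cons q rest ih =>
    intro ts
    rw [List.foldl_cons, ih, pvPatchOne_length]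

theorem pvAlt_eq_spec (tables : List (List (String × String))) :
    disambiguate_headlines_py_alt tables = pvSpecGo [] tables := by
  have hitems : (pvIndex tables).items =
      (pvIndex tables).keys.map (fun k => (k, pvPos k tables 0)) := by
    rw [PySem.Dict.items_eq_map_keys (pvIndex tables) (pvIndex_nodup tables) []]
    exact List.map_congr_left (fun k _ => by rw [pvIndex_getD])
  have hkeymem : ∀ (m : Nat) (hm : m < tables.length),
      pvHl tables[m] ∈ (pvIndex tables).keys := by
    intro m hm
    rw [pvIndex_keys]
    exact (PySem.Set.mem_ofList _ _).mpr (List.mem_map_of_mem (List.getElem_mem hm))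
  apply List.ext_getElem?
  intro i
  by_cases hi : i < tables.length
  · rw [pvSpecGo_getElem? tables [] i hi, List.nil_append]
    unfold disambiguate_headlines_py_alt
    rw [hitems]
    exact pvFold_patch tables (pvIndex tables).keys tables rfl (pvIndex_nodup tables)
      (fun i' hi' => by
        rw [List.getElem?_eq_getElem hi', if_neg (by simp [hkeymem i' hi'])]) i hi
  · rw [List.getElem?_eq_none (by
        unfold disambiguate_headlines_py_alt
        rw [pvFold_patch_length]; omega),
      List.getElem?_eq_none (by rw [pvSpecGo_length]; omega)]

-- ===== VERDICT (by name: the statement is the Claim_ definition above) =====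
theorem disambiguate_headlines_py_spec : Claim_equal_disambiguate_headlines_py := by
  intro tables _ _
  unfold Spec_disambiguate_headlines_py
  rw [pvAlt_eq_spec]
  exact pvGoA_eq_spec tables [] PySem.Dict.empty (fun k => by simp [PySem.Dict.getD_empty, pvCnt])
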